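-- pv_equiv track=rewrite | github.com/randomcuriouscode/Interview-Prep | interview_questions/Amazon/pairs_pos_neg_values.py | pos_neg_pairs
-- ===== SOURCE A (Python) =====
-- from collections import defaultdict
-- import heapq
--
-- def pos_neg_pairs(A):
--     count = defaultdict(lambda: [0,0])
--
--     for i, n in enumerate(A):
--         if n < 0:
--             count[abs(n)][0] += 1
--         else:
--             count[n][1] += 1
--
--     pairs = []
--
--     for k,v in count.items():
--         if v[0] == v[1]:
--             for i in range(v[0]):
--                 pairs.append((-k, k))
--
--     heapq.heapify(pairs)
--
--     return [heapq.heappop(pairs) for i in range(len(pairs))]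
-- ===== SOURCE B (Python) =====
-- def pos_neg_pairs(A):
--     neg = sorted((-n for n in A if n < 0), reverse=True)
--     pos = sorted((n for n in A if n > 0), reverse=True)
--     out = []
--     i = j = 0
--     while i < len(neg) and j < len(pos):
--         if pos[j] < neg[i]:
--             i += 1
--         elif neg[i] < pos[j]:
--             j += 1
--         else:
--             k = neg[i]
--             i2 = i
--             while i2 < len(neg) and neg[i2] == k:
--                 i2 += 1
--             j2 = j
--             while j2 < len(pos) and pos[j2] == k:
--                 j2 += 1
--             if i2 - i == j2 - j:
--                 out += [(-k, k)] * (i2 - i)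
--             i, j = i2, j2
--     return out
-- ===== Notes on version B (the rewrite author's own statement) =====
-- stated objective: alternative
-- what changed: B drops the counting dict entirely: it splits A into two occurrence lists (absolute values of negatives, positives), sorts each descending, and emits matched runs with a two-pointer merge that compares run lengths in place.
import Mathlib
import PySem

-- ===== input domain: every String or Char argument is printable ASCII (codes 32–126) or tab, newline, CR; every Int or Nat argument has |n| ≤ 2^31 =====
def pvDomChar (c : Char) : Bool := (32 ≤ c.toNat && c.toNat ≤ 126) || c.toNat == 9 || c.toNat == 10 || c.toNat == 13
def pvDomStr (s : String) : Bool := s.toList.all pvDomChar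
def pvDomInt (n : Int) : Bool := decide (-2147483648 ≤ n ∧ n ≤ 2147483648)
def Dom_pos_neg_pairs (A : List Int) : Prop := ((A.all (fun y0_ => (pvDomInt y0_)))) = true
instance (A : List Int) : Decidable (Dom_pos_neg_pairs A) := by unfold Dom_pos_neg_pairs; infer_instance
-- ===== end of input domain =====

-- B replaces A's counting dict + heap-sort of all emitted tuples by a dict-free two-pointer
-- merge of the two descending-sorted occurrence lists (objective: alternative).

-- ===== PORT A =====
-- one step of A's counting loop: 'if n < 0: count[abs(n)][0] += 1 else: count[n][1] += 1'
-- (for n < 0, Python's abs(n) is -n)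
def pnpStep (d : PySem.Dict Int (Int × Int)) (n : Int) : PySem.Dict Int (Int × Int) :=
  if n < 0 then
    let v := d.getD (-n) (0, 0)
    d.insert (-n) (v.1 + 1, v.2)
  else
    let v := d.getD n (0, 0)
    d.insert n (v.1, v.2 + 1)

-- 'heapq.heapify(pairs)' + popping every element yields the tuples in ascending lexicographic
-- order; equal tuples are identical pairs, so this is exactly sorting with the tuple key
def pos_neg_pairs (A : List Int) : List (Int × Int) :=
  let count := A.foldl pnpStep PySem.Dict.empty
  let pairs := count.items.foldl (fun acc kv =>
    if kv.2.1 = kv.2.2 then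
      (PySem.List.pyRange 0 kv.2.1 1).foldl (fun acc2 _ => acc2 ++ [(-kv.1, kv.1)]) acc
    else acc) []
  PySem.List.sorted2 pairs (fun p => p.1) (fun p => p.2)

-- ===== PORT B =====
-- inner while loop 'while i2 < len(xs) and xs[i2] == k: i2 += 1' (returns the final index);
-- the fuel argument only makes the recursion structural: xs.length - i more steps never occur
def pnpRunFrom (xs : List Int) (k : Int) : Nat → Nat → Nat
  | 0, i => i
  | fuel + 1, i =>
    if h : i < xs.length then
      if xs[i] = k then pnpRunFrom xs k fuel (i + 1) else i
    else i

-- B's outer while loop, with the accumulated output 'out' (fuel bounds the iteration count)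
def pnpLoop (neg pos : List Int) : Nat → Nat → Nat → List (Int × Int) → List (Int × Int)
  | 0, _, _, out => out
  | fuel + 1, i, j, out =>
    if h : i < neg.length ∧ j < pos.length then
      if pos[j] < neg[i] then pnpLoop neg pos fuel (i + 1) j out
      else if neg[i] < pos[j] then pnpLoop neg pos fuel i (j + 1) out
      else
        let k := neg[i]
        let i2 := pnpRunFrom neg k neg.length i
        let j2 := pnpRunFrom pos k pos.length j
        pnpLoop neg pos fuel i2 j2
          (if i2 - i = j2 - j then out ++ List.replicate (i2 - i) (-k, k) else out)
    else out

def pos_neg_pairs_alt (A : List Int) : List (Int × Int) :=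
  let neg := PySem.List.sorted ((A.filter (fun n => n < 0)).map (fun n => -n)) (fun k => k) true
  let pos := PySem.List.sorted (A.filter (fun n => 0 < n)) (fun k => k) true
  pnpLoop neg pos (neg.length + pos.length) 0 0 []

-- ===== PRECONDITION & SPEC =====
def Spec_pos_neg_pairs (A : List Int) (out : List (Int × Int)) : Prop := out = pos_neg_pairs_alt A
instance (A : List Int) (out : List (Int × Int)) : Decidable (Spec_pos_neg_pairs A out) := by unfold Spec_pos_neg_pairs; infer_instance

-- ===== CLAIM (what is proved, stated in full; the proofs are below) =====
def Claim_equal_pos_neg_pairs : Prop := ∀ (A : List Int), Dom_pos_neg_pairs A → Spec_pos_neg_pairs A (pos_neg_pairs A)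

-- ===== LEMMAS AND PROOFS =====

-- the common block function: the pairs both programs emit for one absolute value k
def pnpBlock (A : List Int) (k : Int) : List (Int × Int) :=
  if 0 < k ∧ A.count (-k) = A.count k then List.replicate (A.count k) (-k, k) else []

-- pnpStep in keyed-insert form
def pnpVal (d : PySem.Dict Int (Int × Int)) (n : Int) : Int × Int :=
  if n < 0 then ((d.getD |n| (0, 0)).1 + 1, (d.getD |n| (0, 0)).2)
  else ((d.getD |n| (0, 0)).1, (d.getD |n| (0, 0)).2 + 1)

lemma pnpStep_eq : pnpStep = fun d n => d.insert |n| (pnpVal d n) := by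
  funext d n
  unfold pnpStep pnpVal
  by_cases h : n < 0
  · simp [h, abs_of_neg h]
  · simp [h, abs_of_nonneg (not_lt.mp h)]

lemma pnp_keys (A : List Int) :
    (A.foldl pnpStep PySem.Dict.empty).keys = PySem.Set.ofList (A.map (fun n => |n|)) := by
  rw [pnpStep_eq, PySem.Dict.keys_foldl_insert_key A (fun n => |n|) pnpVal]
  simp [PySem.Set.update_nil_left]

lemma pnp_keys_nodup (A : List Int) : (A.foldl pnpStep PySem.Dict.empty).keys.Nodup := by
  rw [pnpStep_eq]
  exact PySem.Dict.nodup_keys_foldl_insert_key A (fun n => |n|) pnpVal _ (by simp)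

lemma pnp_getD (A : List Int) (d : PySem.Dict Int (Int × Int)) (k : Int) :
    (A.foldl pnpStep d).getD k (0, 0) =
      ((d.getD k (0, 0)).1 + (A.countP (fun n => decide (n < 0) && decide (-n = k)) : Int),
       (d.getD k (0, 0)).2 + (A.countP (fun n => !decide (n < 0) && decide (n = k)) : Int)) := by
  induction A generalizing d with
  | nil => simp
  | cons a t ih =>
    simp only [List.foldl_cons, List.countP_cons, ih]
    unfold pnpStep
    by_cases ha : a < 0
    · by_cases hk : k = -a
      · subst hk
        simp [ha, PySem.Dict.getD_insert, Prod.ext_iff] <;> omega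
      · have e1 : ¬ (-a = k) := by omega
        simp [ha, hk, e1, PySem.Dict.getD_insert, Prod.ext_iff] <;> omega
    · by_cases hk : k = a
      · subst hk
        simp [ha, PySem.Dict.getD_insert, Prod.ext_iff] <;> omega
      · have e1 : ¬ (a = k) := fun h => hk h.symm
        simp [ha, hk, e1, PySem.Dict.getD_insert, Prod.ext_iff] <;> omega

lemma pnp_getD_pos (A : List Int) (k : Int) (hk : 0 < k) :
    (A.foldl pnpStep PySem.Dict.empty).getD k (0, 0) =
      ((A.count (-k) : Int), (A.count k : Int)) := by
  have h1 : A.countP (fun n => decide (n < 0) && decide (-n = k)) = A.count (-k) := by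
    rw [List.count_eq_countP]
    exact List.countP_congr (fun x _ => by simp; omega)
  have h2 : A.countP (fun n => !decide (n < 0) && decide (n = k)) = A.count k := by
    rw [List.count_eq_countP]
    exact List.countP_congr (fun x _ => by simp; omega)
  rw [pnp_getD, h1, h2]
  simp

lemma pnp_getD_zero (A : List Int) :
    (A.foldl pnpStep PySem.Dict.empty).getD 0 (0, 0) = (0, (A.count 0 : Int)) := by
  have h1 : A.countP (fun n => decide (n < 0) && decide (-n = 0)) = 0 := by
    rw [List.countP_eq_zero]
    intro x _
    simp
    omega
  have h2 : A.countP (fun n => !decide (n < 0) && decide (n = 0)) = A.count 0 := by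
    rw [List.count_eq_countP]
    exact List.countP_congr (fun x _ => by simp; omega)
  rw [pnp_getD, h1, h2]
  simp

-- A's emission for one dict item equals pnpBlock, for keys that actually occur as |n|, n ∈ A
lemma pnp_item_block (A : List Int) (k : Int) (hk : k ∈ PySem.Set.ofList (A.map (fun n => |n|))) :
    (if ((A.foldl pnpStep PySem.Dict.empty).getD k (0, 0)).1 = ((A.foldl pnpStep PySem.Dict.empty).getD k (0, 0)).2 then
       List.replicate (((A.foldl pnpStep PySem.Dict.empty).getD k (0, 0)).1 - 0).toNat (-k, k)
     else []) = pnpBlock A k := by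
  have hmem : k ∈ A.map (fun n => |n|) := (PySem.Set.mem_ofList _ _).mp hk
  obtain ⟨n, hn, rfl⟩ := List.mem_map.mp hmem
  rcases lt_or_eq_of_le (abs_nonneg n) with hpos | hzero
  · rw [pnp_getD_pos A _ hpos]
    unfold pnpBlock
    by_cases hc : A.count (-|n|) = A.count (|n|)
    · simp [hc, hpos]
    · have : ¬ ((A.count (-|n|) : Int) = (A.count (|n|) : Int)) := by exact_mod_cast hc
      simp [this, hc, hpos]
  · rw [← hzero, pnp_getD_zero A]
    have h0 : (0 : Int) ∈ A := by
      have := abs_eq_zero.mp hzero.symm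
      rwa [this] at hn
    have hc : 0 < A.count (0 : Int) := List.count_pos_iff.mpr h0
    unfold pnpBlock
    have : ¬ ((0 : Int) = (A.count (0 : Int) : Int)) := by omega
    simp [this]

-- A's pairs list, before sorting, is the flatMap of pnpBlock over the distinct absolute values
lemma pnp_pairs_eq (A : List Int) :
    ((A.foldl pnpStep PySem.Dict.empty).items.foldl (fun acc kv =>
      if kv.2.1 = kv.2.2 then
        (PySem.List.pyRange 0 kv.2.1 1).foldl (fun acc2 _ => acc2 ++ [(-kv.1, kv.1)]) acc
      else acc) []) =
    (PySem.Set.ofList (A.map (fun n => |n|))).flatMap (pnpBlock A) := by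
  have hstep : ∀ (acc : List (Int × Int)) (kv : Int × (Int × Int)),
      (if kv.2.1 = kv.2.2 then
        (PySem.List.pyRange 0 kv.2.1 1).foldl (fun acc2 _ => acc2 ++ [(-kv.1, kv.1)]) acc
      else acc) =
      acc ++ (if kv.2.1 = kv.2.2 then List.replicate (kv.2.1 - 0).toNat (-kv.1, kv.1) else []) := by
    intro acc kv
    by_cases hc : kv.2.1 = kv.2.2
    · rw [if_pos hc, if_pos hc]
      rw [PySem.List.foldl_append_singleton_eq_map (fun _ => (-kv.1, kv.1))]
      congr 1
      rw [show (fun (_ : Int) => (-kv.1, kv.1)) = Function.const Int (-kv.1, kv.1) from rfl,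
          List.map_const, PySem.List.length_pyRange_one]
    · simp [hc]
  have hfe : (fun (acc : List (Int × Int)) (kv : Int × (Int × Int)) =>
      if kv.2.1 = kv.2.2 then
        (PySem.List.pyRange 0 kv.2.1 1).foldl (fun acc2 _ => acc2 ++ [(-kv.1, kv.1)]) acc
      else acc) =
      (fun acc kv => acc ++ (if kv.2.1 = kv.2.2 then List.replicate (kv.2.1 - 0).toNat (-kv.1, kv.1) else [])) := by
    funext acc kv; exact hstep acc kv
  rw [hfe, PySem.List.foldl_append_eq_flatMap, List.nil_append]
  rw [PySem.Dict.items_eq_map_keys _ (pnp_keys_nodup A) (0, 0), List.flatMap_map, pnp_keys A]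
  apply List.flatMap_congr
  intro k hkmem
  exact pnp_item_block A k hkmem

-- every element of a block is the pair (-k, k)
lemma mem_pnpBlock (A : List Int) (k : Int) (p : Int × Int) (hp : p ∈ pnpBlock A k) :
    p = (-k, k) := by
  unfold pnpBlock at hp
  split at hp
  · exact (List.eq_of_mem_replicate hp)
  · simp at hp

-- the descending flatMap of blocks is pairwise ≤ in the first component
lemma pnp_alt_pairwise (A : List Int) (ks : List Int)
    (hks : ks.Pairwise (fun a b => b < a)) :
    (ks.flatMap (pnpBlock A)).Pairwise (fun p q : Int × Int => p.1 ≤ q.1) := by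
  induction ks with
  | nil => simp
  | cons k t ih =>
    rw [List.flatMap_cons, List.pairwise_append]
    rcases List.pairwise_cons.mp hks with ⟨hhead, htail⟩
    refine ⟨?_, ih htail, ?_⟩
    · apply List.Pairwise.imp_of_mem (R := fun _ _ => True)
      · intro a b ha hb _
        rw [mem_pnpBlock A k a ha, mem_pnpBlock A k b hb]
      · exact List.pairwise_of_forall (fun _ _ => trivial)
    · intro a ha b hb
      obtain ⟨k', hk', hbk'⟩ := List.mem_flatMap.mp hb
      rw [mem_pnpBlock A k a ha, mem_pnpBlock A k' b hbk']
      have := hhead k' hk'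
      simp; omega

-- insertBy only looks at 'before x y' for y in the list
lemma insertBy_congr {α : Type} (b1 b2 : α → α → Bool) (x : α) (ys : List α)
    (h : ∀ y ∈ ys, b1 x y = b2 x y) :
    PySem.List.insertBy b1 x ys = PySem.List.insertBy b2 x ys := by
  induction ys with
  | nil => rfl
  | cons y t ih =>
    unfold PySem.List.insertBy
    rw [h y (by simp)]
    by_cases hb : b2 x y = true
    · simp [hb]
    · simp only [hb, if_false]
      rw [ih (fun z hz => h z (by simp [hz]))]

lemma foldl_insertBy_congr {α : Type} (b1 b2 : α → α → Bool) (l0 l : List α) (acc : List α)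
    (hl : ∀ x ∈ l, x ∈ l0) (hacc : ∀ x ∈ acc, x ∈ l0)
    (h : ∀ x ∈ l0, ∀ y ∈ l0, b1 x y = b2 x y) :
    l.foldl (fun acc x => PySem.List.insertBy b1 x acc) acc =
    l.foldl (fun acc x => PySem.List.insertBy b2 x acc) acc := by
  induction l generalizing acc with
  | nil => rfl
  | cons x t ih =>
    simp only [List.foldl_cons]
    have hx : x ∈ l0 := hl x (List.mem_cons_self)
    rw [insertBy_congr b1 b2 x acc (fun y hy => h x hx y (hacc y hy))]
    apply ih
    · exact fun z hz => hl z (List.mem_cons_of_mem _ hz)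
    · intro z hz
      rcases (PySem.List.mem_insertBy _ _ _ _).mp hz with h' | h'
      · exact h' ▸ hx
      · exact hacc z h'

-- on a list whose elements all satisfy p.2 = -p.1, the lexicographic tuple sort is the
-- sort by first component
lemma sorted2_eq_sorted_fst (xs : List (Int × Int)) (hxs : ∀ p ∈ xs, p.2 = -p.1) :
    PySem.List.sorted2 xs (fun p => p.1) (fun p => p.2) =
    PySem.List.sorted xs (fun p => p.1) := by
  rw [PySem.List.sorted_eq_foldl_insertBy]
  unfold PySem.List.sorted2
  simp only [if_neg (Bool.false_ne_true)]
  apply foldl_insertBy_congr _ _ xs xs _ (fun x hx => hx) (by simp)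
  intro x hx y hy
  have h1 : x.2 = -x.1 := hxs x hx
  have h2 : y.2 = -y.1 := hxs y hy
  by_cases hlt : x.1 < y.1
  · simp [hlt]
  · by_cases hgt : y.1 < x.1
    · simp [hlt, hgt]
    · have hxy : x.1 = y.1 := le_antisymm (not_lt.mp hgt) (not_lt.mp hlt)
      have : ¬ x.2 < y.2 := by omega
      simp [hlt, hgt, this]

-- A's result: the blocks over the descending-sorted distinct absolute values
lemma pnp_A_canon (A : List Int) :
    pos_neg_pairs A =
      (PySem.List.sorted (PySem.Set.ofList (A.map (fun n => |n|))) (fun k => k) true).flatMap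
        (pnpBlock A) := by
  have hA : pos_neg_pairs A = PySem.List.sorted2
      ((A.foldl pnpStep PySem.Dict.empty).items.foldl (fun acc kv =>
        if kv.2.1 = kv.2.2 then
          (PySem.List.pyRange 0 kv.2.1 1).foldl (fun acc2 _ => acc2 ++ [(-kv.1, kv.1)]) acc
        else acc) []) (fun p => p.1) (fun p => p.2) := rfl
  rw [hA, pnp_pairs_eq A]
  set S := PySem.Set.ofList (A.map (fun n => |n|)) with hS
  set K := PySem.List.sorted S (fun k => k) true with hK
  have hdet : ∀ p ∈ S.flatMap (pnpBlock A), p.2 = -p.1 := by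
    intro p hp
    obtain ⟨k, _, hpk⟩ := List.mem_flatMap.mp hp
    rw [mem_pnpBlock A k p hpk]; simp
  rw [sorted2_eq_sorted_fst _ hdet]
  have hperm : (PySem.List.sorted (S.flatMap (pnpBlock A)) (fun p => p.1)).Perm
      (K.flatMap (pnpBlock A)) := by
    refine (PySem.List.sorted_perm _ _ _).trans ?_
    exact (List.Perm.flatMap (PySem.List.sorted_perm S (fun k => k) true)
      (fun a _ => List.Perm.refl _)).symm
  have hKdesc : K.Pairwise (fun a b => b < a) := by
    have h1 : K.Pairwise (fun a b : Int => b ≤ a) := PySem.List.sorted_pairwise_rev S (fun k => k)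
    have h2 : K.Nodup := ((PySem.List.sorted_perm S (fun k => k) true).nodup_iff).mpr
      (PySem.Set.nodup_ofList _)
    exact (h1.and h2).imp (fun hab => lt_of_le_of_ne hab.1 (fun h => hab.2 h.symm))
  have hsorted1 : (PySem.List.sorted (S.flatMap (pnpBlock A)) (fun p => p.1)).Pairwise
      (fun p q : Int × Int => p.1 ≤ q.1) := PySem.List.sorted_pairwise _ _
  have hsorted2 : (K.flatMap (pnpBlock A)).Pairwise (fun p q : Int × Int => p.1 ≤ q.1) :=
    pnp_alt_pairwise A K hKdesc
  apply List.eq_of_perm_of_sorted _ hsorted1 hsorted2 hperm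
  intro a b ha hb hab hba
  have ha' : a.2 = -a.1 := hdet a ((PySem.List.mem_sorted _ _ _ _).mp ha)
  have hb' : b.2 = -b.1 := by
    obtain ⟨k, hk, hbk⟩ := List.mem_flatMap.mp hb
    rw [mem_pnpBlock A k b hbk]; simp
  have h1 : a.1 = b.1 := le_antisymm hab hba
  exact Prod.ext h1 (by omega)

-- ===== B-side: the two-pointer merge in list form =====

-- leading run of k (length)
def pnpRun (xs : List Int) (k : Int) : Nat :=
  match xs with
  | [] => 0
  | x :: t => if x = k then pnpRun t k + 1 else 0

lemma PnpRunLe (xs : List Int) (k : Int) : pnpRun xs k ≤ xs.length := by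
  induction xs with
  | nil => simp [pnpRun]
  | cons a t ih =>
    rw [pnpRun]
    split
    · simpa using ih
    · simp

lemma pnpRun_head_pos (t : List Int) (k : Int) : 1 ≤ pnpRun (k :: t) k := by
  simp [pnpRun]

-- pnpMerge: B's loop, expressed on the suffix lists
def pnpMerge : List Int → List Int → List (Int × Int)
  | [], _ => []
  | _ :: _, [] => []
  | a :: t, b :: u =>
    if hba : b < a then pnpMerge t (b :: u)
    else if hab : a < b then pnpMerge (a :: t) u
    else
      (if pnpRun (a :: t) a = pnpRun (b :: u) a then
        List.replicate (pnpRun (a :: t) a) (-a, a) else []) ++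
        pnpMerge ((a :: t).drop (pnpRun (a :: t) a)) ((b :: u).drop (pnpRun (b :: u) a))
termination_by xs ys => xs.length + ys.length
decreasing_by
  · simp
  · simp
  · have hab' : a = b := le_antisymm (not_lt.mp hba) (not_lt.mp hab)
    have h1 : 1 ≤ pnpRun (a :: t) a := pnpRun_head_pos t a
    have h2 : 1 ≤ pnpRun (b :: u) a := hab' ▸ pnpRun_head_pos u a
    have l1 : ((a :: t).drop (pnpRun (a :: t) a)).length = (a :: t).length - pnpRun (a :: t) a :=
      List.length_drop
    have l2 : ((b :: u).drop (pnpRun (b :: u) a)).length = (b :: u).length - pnpRun (b :: u) a :=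
      List.length_drop
    simp only [l1, l2, List.length_cons]
    omega

-- runFrom = index + leading run of the suffix (the fuel is never exhausted)
lemma pnpRunFrom_eq (xs : List Int) (k : Int) (fuel i : Nat) (hf : xs.length - i ≤ fuel) :
    pnpRunFrom xs k fuel i = i + pnpRun (xs.drop i) k := by
  induction fuel generalizing i with
  | zero =>
    have hle : xs.length ≤ i := by omega
    rw [pnpRunFrom, List.drop_eq_nil_of_le hle, pnpRun]
    omega
  | succ fuel ih =>
    rw [pnpRunFrom]
    by_cases h : i < xs.length
    · rw [List.drop_eq_getElem_cons h]
      by_cases hk : xs[i] = k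
      · rw [dif_pos h, if_pos hk, ih (i + 1) (by omega), pnpRun, if_pos hk]
        omega
      · rw [dif_pos h, if_neg hk, pnpRun, if_neg hk]
        omega
    · rw [dif_neg h, List.drop_eq_nil_of_le (by omega), pnpRun]
      omega

-- the loop equals the merge on the suffixes (given enough fuel)
lemma pnpLoop_eq (neg pos : List Int) (fuel i j : Nat) (out : List (Int × Int))
    (hf : (neg.length - i) + (pos.length - j) ≤ fuel) :
    pnpLoop neg pos fuel i j out = out ++ pnpMerge (neg.drop i) (pos.drop j) := by
  induction fuel generalizing i j out with
  | zero =>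
    rw [pnpLoop]
    have hni : neg.length ≤ i ∨ pos.length ≤ j := by omega
    rcases hni with h' | h'
    · rw [List.drop_eq_nil_of_le h']
      simp [pnpMerge]
    · rw [List.drop_eq_nil_of_le h']
      cases neg.drop i <;> simp [pnpMerge]
  | succ fuel ih =>
    rw [pnpLoop]
    by_cases h : i < neg.length ∧ j < pos.length
    · obtain ⟨hi, hj⟩ := h
      rw [List.drop_eq_getElem_cons hi, List.drop_eq_getElem_cons hj]
      by_cases h1 : pos[j] < neg[i]
      · rw [dif_pos ⟨hi, hj⟩, if_pos h1, ih (i + 1) j out (by omega)]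
        rw [pnpMerge, dif_pos h1, List.drop_eq_getElem_cons hj]
      · by_cases h2 : neg[i] < pos[j]
        · rw [dif_pos ⟨hi, hj⟩, if_neg h1, if_pos h2, ih i (j + 1) out (by omega)]
          rw [pnpMerge, dif_neg h1, dif_pos h2, List.drop_eq_getElem_cons hi]
        · rw [dif_pos ⟨hi, hj⟩, if_neg h1, if_neg h2]
          have heq : neg[i] = pos[j] := le_antisymm (not_lt.mp h1) (not_lt.mp h2)
          have hri : pnpRunFrom neg (neg[i]) neg.length i = i + pnpRun (neg.drop i) (neg[i]) :=
            pnpRunFrom_eq neg _ neg.length i (by omega)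
          have hrj : pnpRunFrom pos (neg[i]) pos.length j = j + pnpRun (pos.drop j) (neg[i]) :=
            pnpRunFrom_eq pos _ pos.length j (by omega)
          have hrun1 : 1 ≤ pnpRun (neg.drop i) (neg[i]) := by
            rw [List.drop_eq_getElem_cons hi, pnpRun, if_pos rfl]
            omega
          have hrun2 : 1 ≤ pnpRun (pos.drop j) (neg[i]) := by
            rw [List.drop_eq_getElem_cons hj, pnpRun, if_pos heq.symm]
            omega
          have hrb1 : pnpRun (neg.drop i) (neg[i]) ≤ neg.length - i := by
            have := PnpRunLe (neg.drop i) (neg[i])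
            simpa [List.length_drop] using this
          have hrb2 : pnpRun (pos.drop j) (neg[i]) ≤ pos.length - j := by
            have := PnpRunLe (pos.drop j) (neg[i])
            simpa [List.length_drop] using this
          rw [ih _ _ _ (by rw [hri, hrj]; omega)]
          rw [pnpMerge, dif_neg h1, dif_neg h2]
          rw [← List.drop_eq_getElem_cons hi, ← List.drop_eq_getElem_cons hj]
          rw [hri, hrj]
          have e1 : i + pnpRun (neg.drop i) (neg[i]) - i = pnpRun (neg.drop i) (neg[i]) := by omega
          have e2 : j + pnpRun (pos.drop j) (neg[i]) - j = pnpRun (pos.drop j) (neg[i]) := by omega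
          rw [e1, e2, List.drop_drop, List.drop_drop]
          split
          · rw [List.append_assoc]
          · rw [List.nil_append]
    · rw [dif_neg h]
      rcases not_and_or.mp h with h' | h'
      · rw [List.drop_eq_nil_of_le (not_lt.mp h')]
        simp [pnpMerge]
      · rw [List.drop_eq_nil_of_le (not_lt.mp h')]
        cases neg.drop i <;> simp [pnpMerge]

-- run of k = count of k, for a descending list bounded by k
lemma pnpRun_eq_count (xs : List Int) (k : Int)
    (hs : xs.Pairwise (fun a b => b ≤ a)) (hb : ∀ x ∈ xs, x ≤ k) :
    pnpRun xs k = xs.count k := by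
  induction xs with
  | nil => simp [pnpRun]
  | cons a t ih =>
    rcases List.pairwise_cons.mp hs with ⟨hat, hts⟩
    by_cases hak : a = k
    · subst hak
      rw [pnpRun, if_pos rfl, List.count_cons_self,
        ih hts (fun x hx => le_trans (hat x hx) (hb a (by simp)))]
    · have halt : a < k := lt_of_le_of_ne (hb a (by simp)) hak
      have hnot : k ∉ a :: t := by
        intro hmem
        rcases List.mem_cons.mp hmem with h' | h'
        · exact hak h'.symm
        · exact absurd (hat k h') (by omega)
      rw [pnpRun, if_neg hak, List.count_eq_zero.mpr hnot]

-- dropping the leading k-run preserves counts of other values …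
lemma count_drop_run (xs : List Int) (k k' : Int) (hkk : k' ≠ k)
    (hs : xs.Pairwise (fun a b => b ≤ a)) (hb : ∀ x ∈ xs, x ≤ k) :
    (xs.drop (xs.count k)).count k' = xs.count k' := by
  induction xs with
  | nil => simp
  | cons a t ih =>
    rcases List.pairwise_cons.mp hs with ⟨hat, hts⟩
    by_cases hak : a = k
    · subst hak
      rw [List.count_cons_self, List.drop_succ_cons,
        ih hts (fun x hx => le_trans (hat x hx) (hb a (by simp)))]
      simp [List.count_cons]
      omega
    · have halt : a < k := lt_of_le_of_ne (hb a (by simp)) hak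
      have hnot : k ∉ a :: t := by
        intro hmem
        rcases List.mem_cons.mp hmem with h' | h'
        · exact hak h'.symm
        · exact absurd (hat k h') (by omega)
      rw [List.count_eq_zero.mpr hnot, List.drop_zero]

-- … and leaves only values < k
lemma drop_run_lt (xs : List Int) (k : Int)
    (hs : xs.Pairwise (fun a b => b ≤ a)) (hb : ∀ x ∈ xs, x ≤ k) :
    ∀ x ∈ xs.drop (xs.count k), x < k := by
  induction xs with
  | nil => simp
  | cons a t ih =>
    rcases List.pairwise_cons.mp hs with ⟨hat, hts⟩
    by_cases hak : a = k
    · subst hak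
      rw [List.count_cons_self, List.drop_succ_cons]
      exact ih hts (fun x hx => le_trans (hat x hx) (hb a (by simp)))
    · have halt : a < k := lt_of_le_of_ne (hb a (by simp)) hak
      have hnot : k ∉ a :: t := by
        intro hmem
        rcases List.mem_cons.mp hmem with h' | h'
        · exact hak h'.symm
        · exact absurd (hat k h') (by omega)
      rw [List.count_eq_zero.mpr hnot, List.drop_zero]
      intro x hx
      rcases List.mem_cons.mp hx with h' | h'
      · omega
      · exact lt_of_le_of_lt (hat x h') halt

-- merge with an empty side is empty
lemma pnpMerge_nil_right (xs : List Int) : pnpMerge xs [] = [] := by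
  cases xs <;> rw [pnpMerge]

-- a descending list bounded by k that contains k has head k
lemma head_eq_of_mem (a : Int) (t : List Int) (k : Int)
    (hs : (a :: t).Pairwise (fun x y => y ≤ x)) (hb : ∀ x ∈ a :: t, x ≤ k)
    (hm : k ∈ a :: t) : a = k := by
  rcases List.mem_cons.mp hm with h | h
  · exact h.symm
  · exact le_antisymm (hb a (by simp)) ((List.pairwise_cons.mp hs).1 k h)

-- one key step of the merge: peel off the (possibly empty) k-runs of both lists
lemma pnpMerge_step_aux (n : Nat) : ∀ (xs ys : List Int) (k : Int),
    xs.length + ys.length ≤ n →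
    xs.Pairwise (fun a b => b ≤ a) → ys.Pairwise (fun a b => b ≤ a) →
    (∀ x ∈ xs, x ≤ k) → (∀ y ∈ ys, y ≤ k) →
    pnpMerge xs ys =
      (if xs.count k = ys.count k then List.replicate (xs.count k) (-k, k) else []) ++
        pnpMerge (xs.drop (xs.count k)) (ys.drop (ys.count k)) := by
  induction n with
  | zero =>
    intro xs ys k hlen _ _ _ _
    have hx : xs = [] := List.eq_nil_of_length_eq_zero (by omega)
    have hy : ys = [] := List.eq_nil_of_length_eq_zero (by omega)
    subst hx hy
    simp [pnpMerge]
  | succ n ih =>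
  intro xs ys k hlen hxs hys hxb hyb
  rcases xs with _ | ⟨a, t⟩
  · rw [List.count_nil]
    simp [pnpMerge]
  rcases ys with _ | ⟨b, u⟩
  · rw [pnpMerge_nil_right, List.count_nil]
    rcases Nat.eq_zero_or_pos ((a :: t).count k) with hc | hc
    · rw [hc]
      simp [pnpMerge_nil_right]
    · rw [if_neg (by omega), List.nil_append, List.drop_nil, pnpMerge_nil_right]
  by_cases hx0 : (a :: t).count k = 0
  · by_cases hy0 : (b :: u).count k = 0
    · rw [hx0, hy0]
      simp
    · -- k occurs in ys but not in xs: the head of ys is k, xs is below it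
      have hbk : b = k := head_eq_of_mem b u k hys hyb
        (List.count_pos_iff.mp (Nat.pos_of_ne_zero hy0))
      have hak : a < k := by
        have h1 : a ≤ k := hxb a (by simp)
        have h2 : a ≠ k := by
          intro h
          subst h
          simp [List.count_cons_self] at hx0
        omega
      rw [pnpMerge, dif_neg (by omega : ¬ b < a), dif_pos (by omega : a < b)]
      have hu : pnpMerge (a :: t) u =
          (if (a :: t).count k = u.count k then List.replicate ((a :: t).count k) (-k, k) else []) ++
            pnpMerge ((a :: t).drop ((a :: t).count k)) (u.drop (u.count k)) :=
        ih (a :: t) u k (by simp at hlen ⊢; omega) hxs (List.pairwise_cons.mp hys).2 hxb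
          (fun y hy => hyb y (by simp [hy]))
      rw [hu, hx0]
      have hcnt : (b :: u).count k = u.count k + 1 := by
        rw [hbk, List.count_cons_self]
      rw [hcnt]
      rw [if_neg (by omega : ¬ (0 : Nat) = u.count k + 1), List.drop_zero, List.drop_succ_cons]
      by_cases h0u : (0 : Nat) = u.count k
      · rw [if_pos h0u]
        simp
      · rw [if_neg h0u]
  · -- k occurs in xs: the head of xs is k
    have hakk : a = k := head_eq_of_mem a t k hxs hxb
      (List.count_pos_iff.mp (Nat.pos_of_ne_zero hx0))
    by_cases hy0 : (b :: u).count k = 0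
    · -- k not in ys: head b < k = a, peel one a off xs
      have hbk : b < k := by
        have h1 : b ≤ k := hyb b (by simp)
        have h2 : b ≠ k := by
          intro h
          subst h
          simp [List.count_cons_self] at hy0
        omega
      rw [pnpMerge, dif_pos (by omega : b < a)]
      have ht : pnpMerge t (b :: u) =
          (if t.count k = (b :: u).count k then List.replicate (t.count k) (-k, k) else []) ++
            pnpMerge (t.drop (t.count k)) ((b :: u).drop ((b :: u).count k)) :=
        ih t (b :: u) k (by simp at hlen ⊢; omega) (List.pairwise_cons.mp hxs).2 hys
          (fun x hx => hxb x (by simp [hx])) hyb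
      rw [ht, hy0]
      have hcnt : (a :: t).count k = t.count k + 1 := by
        rw [hakk, List.count_cons_self]
      rw [hcnt, List.drop_zero]
      rw [if_neg (by omega : ¬ t.count k + 1 = 0)]
      by_cases h0t : t.count k = 0
      · rw [if_pos (by omega : t.count k = 0), List.drop_succ_cons, h0t, List.drop_zero]
        simp
      · rw [if_neg h0t, List.drop_succ_cons]
    · -- k in both: heads are both k, the merge takes the run branch
      have hbkk : b = k := head_eq_of_mem b u k hys hyb
        (List.count_pos_iff.mp (Nat.pos_of_ne_zero hy0))
      rw [pnpMerge, dif_neg (by omega : ¬ b < a), dif_neg (by omega : ¬ a < b)]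
      have hr1 : pnpRun (a :: t) a = (a :: t).count a :=
        pnpRun_eq_count (a :: t) a hxs (hakk ▸ hxb)
      have hr2 : pnpRun (b :: u) a = (b :: u).count a := by
        rw [hakk]
        exact pnpRun_eq_count (b :: u) k hys hyb
      rw [hr1, hr2, hakk]

lemma pnpMerge_step (xs ys : List Int) (k : Int)
    (hxs : xs.Pairwise (fun a b => b ≤ a)) (hys : ys.Pairwise (fun a b => b ≤ a))
    (hxb : ∀ x ∈ xs, x ≤ k) (hyb : ∀ y ∈ ys, y ≤ k) :
    pnpMerge xs ys =
      (if xs.count k = ys.count k then List.replicate (xs.count k) (-k, k) else []) ++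
        pnpMerge (xs.drop (xs.count k)) (ys.drop (ys.count k)) :=
  pnpMerge_step_aux (xs.length + ys.length) xs ys k (le_refl _) hxs hys hxb hyb

-- the merge over any strictly descending key list covering both inputs
lemma pnpMerge_flatMap (K : List Int) (xs ys : List Int)
    (hxs : xs.Pairwise (fun a b => b ≤ a)) (hys : ys.Pairwise (fun a b => b ≤ a))
    (hK : K.Pairwise (fun a b => b < a))
    (hxm : ∀ x ∈ xs, x ∈ K) (hym : ∀ y ∈ ys, y ∈ K) :
    pnpMerge xs ys = K.flatMap (fun k =>
      if xs.count k = ys.count k then List.replicate (xs.count k) (-k, k) else []) := by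
  induction K generalizing xs ys with
  | nil =>
    have hx : xs = [] := List.eq_nil_iff_forall_not_mem.mpr (fun x hx => by simpa using hxm x hx)
    subst hx
    simp [pnpMerge]
  | cons k K' ih =>
    rcases List.pairwise_cons.mp hK with ⟨hkK, hK'⟩
    have hxb : ∀ x ∈ xs, x ≤ k := by
      intro x hx
      rcases List.mem_cons.mp (hxm x hx) with h | h
      · omega
      · have := hkK x h
        omega
    have hyb : ∀ y ∈ ys, y ≤ k := by
      intro y hy
      rcases List.mem_cons.mp (hym y hy) with h | h
      · omega
      · have := hkK y h
        omega
    rw [pnpMerge_step xs ys k hxs hys hxb hyb, List.flatMap_cons]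
    congr 1
    rw [ih (xs.drop (xs.count k)) (ys.drop (ys.count k))
      (hxs.sublist (List.drop_sublist _ _)) (hys.sublist (List.drop_sublist _ _)) hK'
      ?_ ?_]
    · apply List.flatMap_congr
      intro k' hk'
      have hkk' : k' ≠ k := by
        have := hkK k' hk'
        omega
      rw [count_drop_run xs k k' hkk' hxs hxb, count_drop_run ys k k' hkk' hys hyb]
    · intro x hx
      have hlt : x < k := drop_run_lt xs k hxs hxb x hx
      have hmem : x ∈ k :: K' := hxm x (List.mem_of_mem_drop hx)
      rcases List.mem_cons.mp hmem with h | h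
      · omega
      · exact h
    · intro y hy
      have hlt : y < k := drop_run_lt ys k hys hyb y hy
      have hmem : y ∈ k :: K' := hym y (List.mem_of_mem_drop hy)
      rcases List.mem_cons.mp hmem with h | h
      · omega
      · exact h

-- ===== VERDICT (by name: the statement is the Claim_ definition above) =====
theorem pos_neg_pairs_spec : Claim_equal_pos_neg_pairs := by
  intro A _
  unfold Spec_pos_neg_pairs
  set Neg := (A.filter (fun n => n < 0)).map (fun n => -n) with hNeg
  set Pos := A.filter (fun n => 0 < n) with hPos
  set ns := PySem.List.sorted Neg (fun k => k) true with hns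
  set ps := PySem.List.sorted Pos (fun k => k) true with hps
  set S := PySem.Set.ofList (A.map (fun n => |n|)) with hS
  set K := PySem.List.sorted S (fun k => k) true with hK
  have hKdesc : K.Pairwise (fun a b => b < a) := by
    have h1 : K.Pairwise (fun a b : Int => b ≤ a) := PySem.List.sorted_pairwise_rev S (fun k => k)
    have h2 : K.Nodup := ((PySem.List.sorted_perm S (fun k => k) true).nodup_iff).mpr
      (PySem.Set.nodup_ofList _)
    exact (h1.and h2).imp (fun hab => lt_of_le_of_ne hab.1 (fun h => hab.2 h.symm))
  have halt : pos_neg_pairs_alt A = pnpMerge ns ps := by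
    show pnpLoop ns ps (ns.length + ps.length) 0 0 [] = pnpMerge ns ps
    rw [pnpLoop_eq ns ps _ 0 0 [] (by omega), List.drop_zero, List.drop_zero, List.nil_append]
  -- counts in the sorted occurrence lists
  have hnsc : ∀ k : Int, 0 < k → ns.count k = A.count (-k) := by
    intro k hk
    rw [(PySem.List.sorted_perm Neg (fun k => k) true).count_eq, hNeg]
    rw [List.count_eq_countP, List.countP_map, List.countP_filter, List.count_eq_countP]
    apply List.countP_congr
    intro x _
    simp [Function.comp]
    omega
  have hpsc : ∀ k : Int, 0 < k → ps.count k = A.count k := by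
    intro k hk
    rw [(PySem.List.sorted_perm Pos (fun k => k) true).count_eq, hPos]
    rw [List.count_eq_countP, List.countP_filter, List.count_eq_countP]
    apply List.countP_congr
    intro x _
    simp
    omega
  have hnsmem : ∀ x ∈ ns, 0 < x ∧ x ∈ K := by
    intro x hx
    have hx' : x ∈ Neg := (PySem.List.mem_sorted _ _ _ _).mp hx
    obtain ⟨n, hn, rfl⟩ := List.mem_map.mp hx'
    rcases List.mem_filter.mp hn with ⟨hnA, hneg⟩
    have hneg' : n < 0 := by simpa using hneg
    constructor
    · omega
    · rw [hK]
      apply (PySem.List.mem_sorted _ _ _ _).mpr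
      rw [hS]
      apply (PySem.Set.mem_ofList _ _).mpr
      exact List.mem_map.mpr ⟨n, hnA, by rw [abs_of_neg hneg']⟩
  have hpsmem : ∀ x ∈ ps, 0 < x ∧ x ∈ K := by
    intro x hx
    have hx' : x ∈ Pos := (PySem.List.mem_sorted _ _ _ _).mp hx
    rcases List.mem_filter.mp hx' with ⟨hxA, hpos⟩
    have hpos' : 0 < x := by simpa using hpos
    constructor
    · exact hpos'
    · rw [hK]
      apply (PySem.List.mem_sorted _ _ _ _).mpr
      rw [hS]
      apply (PySem.Set.mem_ofList _ _).mpr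
      exact List.mem_map.mpr ⟨x, hxA, by rw [abs_of_pos hpos']⟩
  rw [halt, pnpMerge_flatMap K ns ps
    (PySem.List.sorted_pairwise_rev Neg (fun k => k))
    (PySem.List.sorted_pairwise_rev Pos (fun k => k)) hKdesc
    (fun x hx => (hnsmem x hx).2) (fun y hy => (hpsmem y hy).2)]
  rw [pnp_A_canon A]
  apply List.flatMap_congr
  intro k hkK
  have hk0 : 0 ≤ k := by
    have : k ∈ S := (PySem.List.mem_sorted _ _ _ _).mp hkK
    have : k ∈ A.map (fun n => |n|) := (PySem.Set.mem_ofList _ _).mp this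
    obtain ⟨n, _, rfl⟩ := List.mem_map.mp this
    exact abs_nonneg n
  rcases lt_or_eq_of_le hk0 with hkpos | hkz
  · rw [hnsc k hkpos, hpsc k hkpos]
    unfold pnpBlock
    by_cases hc : A.count (-k) = A.count k
    · rw [if_pos hc, if_pos ⟨hkpos, hc⟩, hc]
    · rw [if_neg hc, if_neg (by tauto)]
  · have hns0 : ns.count 0 = 0 := by
      rw [List.count_eq_zero]
      intro hmem
      have := (hnsmem 0 hmem).1
      omega
    have hps0 : ps.count 0 = 0 := by
      rw [List.count_eq_zero]
      intro hmem
      have := (hpsmem 0 hmem).1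
      omega
    rw [← hkz, hns0, hps0]
    unfold pnpBlock
    rw [if_pos rfl, if_neg (by simp)]
    simp
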